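-- pv_equiv track=rewrite | github.com/ArielHorwitz/mousefox | kex/widgets/input_manager.py | _format_keys
-- ===== SOURCE A (Python) =====
-- from typing import Callable, Union, TypeVar, Iterable, Optional
--
-- KeysFormat = TypeVar("KeysFormat", bound=str)
--
-- MODIFIER_SORT = "^!+#"
--
-- MOD2KEY = {
--     "ctrl": "^",
--     "alt-gr": "!",
--     "alt": "!",
--     "shift": "+",
--     "super": "#",
--     "meta": "#",
--     "control": "^",
--     "lctrl": "^",
--     "rctrl": "^",
--     "lalt": "!",
--     "ralt": "!",
--     "lshift": "+",
--     "rshift": "+",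
--     "numlock": "",
--     "capslock": "",
-- }
--
-- def _format_keys(
--     modifiers: list[str],
--     key_name: str,
--     honor_numlock: bool = True,
-- ) -> KeysFormat:
--     """Convert a combination of keys to a standard string format."""
--     if (
--         honor_numlock
--         and "numlock" in modifiers
--         and key_name.startswith("numpad")
--         and len(key_name) == 7
--     ):
--         key_name = key_name[-1]
--     # Remove duplicate modifiers
--     modifiers = set(MOD2KEY[mod] for mod in modifiers)
--     modifiers -= {""}
--     # Remove modifier if it is the main key being pressed
--     # e.g. when key_name == "lctrl", "ctrl" will be in modifiers
--     if key_name in MOD2KEY: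
--         modifiers -= {MOD2KEY[key_name]}
--     # No space required if no modifiers
--     if len(modifiers) == 0:
--         return key_name
--     # Order of modifiers should be consistent
--     sorted_modifiers = sorted(modifiers, key=lambda x: MODIFIER_SORT.index(x))
--     # Return the KeysFormat
--     mod_str = "".join(sorted_modifiers)
--     return f"{mod_str} {key_name}"
-- ===== SOURCE B (Python) =====
-- MODIFIER_SORT = "^!+#"
--
-- MOD2KEY = {
--     "ctrl": "^",
--     "alt-gr": "!",
--     "alt": "!",
--     "shift": "+",
--     "super": "#",
--     "meta": "#",
--     "control": "^",
--     "lctrl": "^",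
--     "rctrl": "^",
--     "lalt": "!",
--     "ralt": "!",
--     "lshift": "+",
--     "rshift": "+",
--     "numlock": "",
--     "capslock": "",
-- }
--
--
-- def _format_keys(
--     modifiers: list[str],
--     key_name: str,
--     honor_numlock: bool = True,
-- ) -> str:
--     """Convert a combination of keys to a standard string format."""
--     if (
--         honor_numlock
--         and "numlock" in modifiers
--         and key_name.startswith("numpad")
--         and len(key_name) == 7
--     ):
--         key_name = key_name[-1]
--     # Symbol of the main key (never emitted as a modifier), '' if none.
--     skip = MOD2KEY.get(key_name, "")
--     # Build the modifier string directly in canonical order: one pass over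
--     # the fixed priority string, no set and no sort.
--     mod_str = "".join(
--         c for c in MODIFIER_SORT
--         if c != skip and any(MOD2KEY[m] == c for m in modifiers)
--     )
--     if not mod_str:
--         return key_name
--     return f"{mod_str} {key_name}"
-- ===== Notes on version B (the rewrite author's own statement) =====
-- stated objective: simpler
-- what changed: B drops A's set-building, set-subtraction and key-sort entirely: it computes the main key's symbol once and builds the modifier string by one filter pass over the fixed priority string MODIFIER_SORT, which yields the canonical order for free.
import Mathlib
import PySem

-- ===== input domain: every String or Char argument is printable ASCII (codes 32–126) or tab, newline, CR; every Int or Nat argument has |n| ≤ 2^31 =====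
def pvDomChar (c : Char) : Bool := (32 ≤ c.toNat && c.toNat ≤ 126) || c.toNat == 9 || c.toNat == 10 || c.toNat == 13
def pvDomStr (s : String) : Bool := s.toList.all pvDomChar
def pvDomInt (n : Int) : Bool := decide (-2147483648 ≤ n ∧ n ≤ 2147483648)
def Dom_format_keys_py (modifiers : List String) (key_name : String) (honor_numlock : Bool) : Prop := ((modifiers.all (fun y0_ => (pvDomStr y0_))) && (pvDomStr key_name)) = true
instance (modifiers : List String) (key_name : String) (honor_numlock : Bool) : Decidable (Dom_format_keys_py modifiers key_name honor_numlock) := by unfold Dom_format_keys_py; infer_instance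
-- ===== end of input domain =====

-- B replaces A's set-build / set-subtract / sort-by-index pipeline with one filter pass
-- over the fixed priority string, which yields the canonical modifier order directly (objective: simpler).

-- ===== PORT A =====
-- module constant MODIFIER_SORT
def pvModifierSort : String := "^!+#"

-- module constant MOD2KEY
def pvMod2Key : PySem.Dict String String := PySem.Dict.ofList
  [("ctrl", "^"), ("alt-gr", "!"), ("alt", "!"), ("shift", "+"), ("super", "#"),
   ("meta", "#"), ("control", "^"), ("lctrl", "^"), ("rctrl", "^"), ("lalt", "!"),
   ("ralt", "!"), ("lshift", "+"), ("rshift", "+"), ("numlock", ""), ("capslock", "")]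

-- the numlock special case, the identical first statement of A and of B:
-- if honor_numlock and "numlock" in modifiers and key_name.startswith("numpad") and len(key_name) == 7: key_name = key_name[-1]
def pvNumlockKey (modifiers : List String) (key_name : String) (honor_numlock : Bool) : String :=
  if honor_numlock && modifiers.contains "numlock" && PySem.Str.startswith key_name "numpad"
      && (PySem.Str.len key_name == 7) then
    -- key_name[-1]: under the guard len(key_name) = 7 > 0, pyGet? is `some` and the default is never taken
    ((PySem.Str.pyGet? key_name (-1)).map (fun c => String.ofList [c])).getD key_name
  else key_name

def format_keys_py (modifiers : List String) (key_name : String) (honor_numlock : Bool) : String :=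
  let key_name := pvNumlockKey modifiers key_name honor_numlock
  -- modifiers = set(MOD2KEY[mod] for mod in modifiers)
  -- MOD2KEY[mod] raises KeyError for an unknown modifier; Pre_ excludes those inputs, so getD's default is never taken there
  let mods : PySem.Set String := PySem.Set.ofList (modifiers.map (fun m => pvMod2Key.getD m ""))
  -- modifiers -= {""}
  let mods := PySem.Set.diff mods [""]
  -- if key_name in MOD2KEY: modifiers -= {MOD2KEY[key_name]}
  let mods := if pvMod2Key.contains key_name then PySem.Set.diff mods [pvMod2Key.getD key_name ""] else mods
  -- if len(modifiers) == 0: return key_name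
  if PySem.Set.len mods == 0 then key_name
  else
    -- sorted(modifiers, key=lambda x: MODIFIER_SORT.index(x)); every element occurring here
    -- is a character of MODIFIER_SORT, so str.index = PySem.Str.find (no ValueError inside Pre_)
    let sorted_modifiers := PySem.List.sorted mods (fun x => PySem.Str.find pvModifierSort x)
    let mod_str := PySem.Str.join "" sorted_modifiers
    -- f"{mod_str} {key_name}"
    PySem.Str.join " " [mod_str, key_name]

-- ===== PORT B =====
def format_keys_py_alt (modifiers : List String) (key_name : String) (honor_numlock : Bool) : String :=
  let key_name := pvNumlockKey modifiers key_name honor_numlock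
  -- skip = MOD2KEY.get(key_name, "")
  let skip := pvMod2Key.getD key_name ""
  -- "".join(c for c in MODIFIER_SORT if c != skip and any(MOD2KEY[m] == c for m in modifiers));
  -- "".join over single characters is exactly String.ofList of the filtered character list
  let mod_chars := pvModifierSort.toList.filter
    (fun c => (String.ofList [c] != skip) && modifiers.any (fun m => pvMod2Key.getD m "" == String.ofList [c]))
  -- if not mod_str: return key_name
  if mod_chars.isEmpty then key_name
  -- f"{mod_str} {key_name}"
  else PySem.Str.join " " [String.ofList mod_chars, key_name]

-- ===== PRECONDITION & SPEC =====
-- Pre_ excludes exactly the inputs on which A raises KeyError: a modifier that is not a key of MOD2KEY.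
def Pre_format_keys_py (modifiers : List String) (key_name : String) (honor_numlock : Bool) : Prop :=
  ∀ m ∈ modifiers, pvMod2Key.contains m = true
instance (modifiers : List String) (key_name : String) (honor_numlock : Bool) : Decidable (Pre_format_keys_py modifiers key_name honor_numlock) := by unfold Pre_format_keys_py; infer_instance

def pvWitness_format_keys_py : List String × String × Bool := (["ctrl", "shift"], "a", true)

def Spec_format_keys_py (modifiers : List String) (key_name : String) (honor_numlock : Bool) (out : String) : Prop := out = format_keys_py_alt modifiers key_name honor_numlock
instance (modifiers : List String) (key_name : String) (honor_numlock : Bool) (out : String) : Decidable (Spec_format_keys_py modifiers key_name honor_numlock out) := by unfold Spec_format_keys_py; infer_instance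

-- ===== CLAIM (what is proved, stated in full; the proofs are below) =====
def Claim_equal_format_keys_py : Prop := ∀ (modifiers : List String) (key_name : String) (honor_numlock : Bool), Dom_format_keys_py modifiers key_name honor_numlock → Pre_format_keys_py modifiers key_name honor_numlock → Spec_format_keys_py modifiers key_name honor_numlock (format_keys_py modifiers key_name honor_numlock)

-- ===== LEMMAS AND PROOFS =====

-- every value of MOD2KEY at a present key is one of the five symbol strings
theorem pvMod2Key_val_mem (m : String) (h : pvMod2Key.contains m = true) :
    pvMod2Key.getD m "" ∈ (["^", "!", "+", "#", ""] : List String) := by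
  have hk : m ∈ pvMod2Key.keys := (PySem.Dict.contains_iff_mem_keys _ _).mp h
  have hkeys : pvMod2Key.keys = ["ctrl", "alt-gr", "alt", "shift", "super", "meta",
      "control", "lctrl", "rctrl", "lalt", "ralt", "lshift", "rshift", "numlock", "capslock"] := by decide
  rw [hkeys] at hk
  simp only [List.mem_cons, List.not_mem_nil, or_false] at hk
  rcases hk with rfl|rfl|rfl|rfl|rfl|rfl|rfl|rfl|rfl|rfl|rfl|rfl|rfl|rfl|rfl <;> decide

-- the two bodies agree after the (shared) numlock step, for any resulting key k
theorem pv_core (modifiers : List String) (k : String)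
    (hpre : ∀ m ∈ modifiers, pvMod2Key.contains m = true) :
    (let mods : PySem.Set String := PySem.Set.ofList (modifiers.map (fun m => pvMod2Key.getD m ""))
     let mods := PySem.Set.diff mods [""]
     let mods := if pvMod2Key.contains k then PySem.Set.diff mods [pvMod2Key.getD k ""] else mods
     if PySem.Set.len mods == 0 then k
     else
       let sorted_modifiers := PySem.List.sorted mods (fun x => PySem.Str.find pvModifierSort x)
       let mod_str := PySem.Str.join "" sorted_modifiers
       PySem.Str.join " " [mod_str, k]) =
    (let skip := pvMod2Key.getD k ""
     let mod_chars := pvModifierSort.toList.filter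
       (fun c => (String.ofList [c] != skip) && modifiers.any (fun m => pvMod2Key.getD m "" == String.ofList [c]))
     if mod_chars.isEmpty then k
     else PySem.Str.join " " [String.ofList mod_chars, k]) := by
  simp only []
  set s1 : PySem.Set String :=
    PySem.Set.diff (PySem.Set.ofList (modifiers.map (fun m => pvMod2Key.getD m ""))) [""] with hs1
  set s2 : PySem.Set String :=
    (if pvMod2Key.contains k then PySem.Set.diff s1 [pvMod2Key.getD k ""] else s1) with hs2
  set p : Char → Bool := (fun c => (String.ofList [c] != pvMod2Key.getD k "") &&
      modifiers.any (fun m => pvMod2Key.getD m "" == String.ofList [c])) with hp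
  set mod_chars := pvModifierSort.toList.filter p with hmc
  -- membership characterization of A's final set s2
  have hmem : ∀ x : String, x ∈ s2 ↔
      (x ∈ modifiers.map (fun m => pvMod2Key.getD m "") ∧ x ≠ "" ∧
        (pvMod2Key.contains k = true → x ≠ pvMod2Key.getD k "")) := by
    intro x
    rw [hs2]
    by_cases hc : pvMod2Key.contains k = true
    · simp [hc, hs1, PySem.Set.mem_diff, PySem.Set.mem_ofList, and_assoc]
    · simp [hc, hs1, PySem.Set.mem_diff, PySem.Set.mem_ofList]
  have hnd : s2.Nodup := by
    rw [hs2]; split <;>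
      [exact PySem.Set.nodup_diff _ _ (PySem.Set.nodup_diff _ _ (PySem.Set.nodup_ofList _));
       exact PySem.Set.nodup_diff _ _ (PySem.Set.nodup_ofList _)]
  have hsub : ∀ x ∈ s2, x ∈ (["^", "!", "+", "#"] : List String) := by
    intro x hx
    rcases (hmem x).mp hx with ⟨hxv, hxne, -⟩
    rcases List.mem_map.mp hxv with ⟨m, hm, rfl⟩
    have := pvMod2Key_val_mem m (hpre m hm)
    simp only [List.mem_cons, List.not_mem_nil, or_false] at this ⊢
    tauto
  -- B's filter predicate is membership in s2, on the canonical characters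
  have hpmem : ∀ c ∈ pvModifierSort.toList, p c = decide (String.ofList [c] ∈ s2) := by
    intro c hc
    have hne : String.ofList [c] ≠ "" := by
      intro h
      have := congrArg String.toList h
      simp at this
    rw [hp, Bool.eq_iff_iff]
    simp only [Bool.and_eq_true, bne_iff_ne, ne_eq, List.any_eq_true, beq_iff_eq,
      decide_eq_true_eq, hmem, List.mem_map]
    by_cases hck : pvMod2Key.contains k = true
    · simp only [hck, true_implies]
      constructor
      · rintro ⟨hskip, m, hm, hx⟩
        exact ⟨⟨m, hm, hx⟩, hne, hskip⟩
      · rintro ⟨⟨m, hm, hx⟩, -, hment⟩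
        exact ⟨hment, m, hm, hx⟩
    · have hskip : pvMod2Key.getD k "" = "" :=
        PySem.Dict.getD_of_not_contains _ _ (by simpa using hck)
      rw [hskip]
      constructor
      · rintro ⟨-, m, hm, hx⟩
        exact ⟨⟨m, hm, hx⟩, hne, fun h => absurd h hck⟩
      · rintro ⟨⟨m, hm, hx⟩, -, -⟩
        exact ⟨hne, m, hm, hx⟩
  -- A's sorted set IS the canonical-order filter
  have hsorted : PySem.List.sorted s2 (fun x => PySem.Str.find pvModifierSort x) =
      (["^", "!", "+", "#"] : List String).filter (fun x => decide (x ∈ s2)) := by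
    apply PySem.List.sorted_eq_of_perm_of_pairwise_lt
    · rw [List.perm_ext_iff_of_nodup (List.Nodup.filter _ (by decide)) hnd]
      intro x
      simp only [List.mem_filter, decide_eq_true_eq]
      constructor
      · exact fun h => h.2
      · exact fun h => ⟨hsub x h, h⟩
    · exact List.Pairwise.sublist List.filter_sublist (by decide)
  have hcanon : (["^", "!", "+", "#"] : List String) =
      (['^', '!', '+', '#'] : List Char).map (fun c => String.ofList [c]) := by decide
  have hchars : pvModifierSort.toList = (['^', '!', '+', '#'] : List Char) := by decide
  have hfilter : (["^", "!", "+", "#"] : List String).filter (fun x => decide (x ∈ s2)) =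
      mod_chars.map (fun c => String.ofList [c]) := by
    rw [hcanon, List.filter_map, hmc, hchars]
    congr 1
    refine (List.filter_congr ?_).symm
    intro c hc
    rw [hpmem c (by rw [hchars]; exact hc)]
    rfl
  have hlen : s2.length = mod_chars.length := by
    have h1 := (PySem.List.sorted_perm s2 (fun x => PySem.Str.find pvModifierSort x) false).length_eq
    rw [hsorted, hfilter] at h1
    simpa using h1.symm
  have hjoin : PySem.Str.join "" (PySem.List.sorted s2 (fun x => PySem.Str.find pvModifierSort x)) =
      String.ofList mod_chars := by
    rw [hsorted, hfilter]
    apply String.toList_inj.mp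
    rw [PySem.Str.toList_join, List.map_map]
    have h1 : (String.toList ∘ fun c : Char => String.ofList [c]) = (fun c : Char => [c]) := by
      funext c; simp
    rw [show ("" : String).toList = [] from rfl, h1, PySem.Chars.join_nil_singletons]
    simp
  by_cases h0 : mod_chars = []
  · have hA : (PySem.Set.len s2 == 0) = true := by
      simp [PySem.Set.len, hlen, h0]
    have hB : mod_chars.isEmpty = true := by simp [h0]
    rw [hA, hB]
    simp
  · have hA : (PySem.Set.len s2 == 0) = false := by
      simp [PySem.Set.len, hlen, List.length_eq_zero_iff, h0]
    have hB : mod_chars.isEmpty = false := by simp [h0]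
    rw [hA, hB, if_neg (by simp), if_neg (by simp), hjoin]

theorem pv_main (modifiers : List String) (key_name : String) (honor_numlock : Bool)
    (hpre : ∀ m ∈ modifiers, pvMod2Key.contains m = true) :
    format_keys_py modifiers key_name honor_numlock = format_keys_py_alt modifiers key_name honor_numlock := by
  unfold format_keys_py format_keys_py_alt
  exact pv_core modifiers (pvNumlockKey modifiers key_name honor_numlock) hpre

-- ===== VERDICT (by name: the statement is the Claim_ definition above) =====
theorem format_keys_py_spec : Claim_equal_format_keys_py := by
  intro modifiers key_name honor_numlock _ hpre
  unfold Spec_format_keys_py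
  exact pv_main modifiers key_name honor_numlock hpre
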